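-- pv_equiv track=rewrite | github.com/abdillah-core/tes-1 | app.py | translate_bulan
-- ===== SOURCE A (Python) =====
-- def translate_bulan(text):
--     bulan_map = {
--         "JAN": "JAN", "FEB": "FEB", "MAR": "MAR", "APR": "APR", "MEI": "MAY",
--         "JUN": "JUN", "JUL": "JUL", "AGU": "AUG", "SEP": "SEP", "OKT": "OCT",
--         "NOV": "NOV", "DES": "DEC"
--     }
--     for indo, eng in bulan_map.items():
--         text = text.replace(indo, eng)
--     return text
-- ===== SOURCE B (Python) =====
-- def translate_bulan(text):
--     bulan_map = {
--         "JAN": "JAN", "FEB": "FEB", "MAR": "MAR", "APR": "APR", "MEI": "MAY",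
--         "JUN": "JUN", "JUL": "JUL", "AGU": "AUG", "SEP": "SEP", "OKT": "OCT",
--         "NOV": "NOV", "DES": "DEC"
--     }
--     out = []
--     i = 0
--     n = len(text)
--     while i < n:
--         tok = text[i:i+3]
--         if tok in bulan_map:
--             out.append(bulan_map[tok])
--             i += 3
--         else:
--             out.append(text[i])
--             i += 1
--     return "".join(out)
-- ===== Notes on version B (the rewrite author's own statement) =====
-- stated objective: alternative
-- what changed: A makes 12 sequential whole-string str.replace passes (one per month entry); B makes a single left-to-right pass over the text, looking each 3-character window up in the month dict and emitting either the mapped month or one character.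
import Mathlib
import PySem

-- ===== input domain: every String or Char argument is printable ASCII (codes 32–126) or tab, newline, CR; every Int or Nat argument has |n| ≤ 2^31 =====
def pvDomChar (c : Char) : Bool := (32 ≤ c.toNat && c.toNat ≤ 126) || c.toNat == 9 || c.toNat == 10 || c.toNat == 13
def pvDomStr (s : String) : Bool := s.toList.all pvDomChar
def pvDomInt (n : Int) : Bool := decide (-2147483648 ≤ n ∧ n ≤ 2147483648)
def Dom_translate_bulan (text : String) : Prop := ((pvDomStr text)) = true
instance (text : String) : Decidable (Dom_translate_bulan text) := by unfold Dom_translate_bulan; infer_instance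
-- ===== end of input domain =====

-- B replaces A's 12 sequential whole-string str.replace passes by a single left-to-right scan
-- that looks each 3-character window up in the month table (objective: alternative one-pass algorithm).

-- ===== PORT A =====
-- A's dict literal, in insertion order
def pvBulanMapA : PySem.Dict String String :=
  PySem.Dict.ofList
    [("JAN", "JAN"), ("FEB", "FEB"), ("MAR", "MAR"), ("APR", "APR"), ("MEI", "MAY"),
     ("JUN", "JUN"), ("JUL", "JUL"), ("AGU", "AUG"), ("SEP", "SEP"), ("OKT", "OCT"),
     ("NOV", "NOV"), ("DES", "DEC")]

-- for indo, eng in bulan_map.items(): text = text.replace(indo, eng); return text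
def translate_bulan (text : String) : String :=
  (pvBulanMapA.items).foldl (fun t p => PySem.Str.replace t p.1 p.2) text

-- ===== PORT B =====
-- B's dict literal (keys/values as char lists: B consults it with 3-character slices of the text)

def pvBulanMapB : PySem.Dict (List Char) (List Char) :=
  PySem.Dict.ofList
    [(['J','A','N'], ['J','A','N']), (['F','E','B'], ['F','E','B']), (['M','A','R'], ['M','A','R']),
     (['A','P','R'], ['A','P','R']), (['M','E','I'], ['M','A','Y']), (['J','U','N'], ['J','U','N']),
     (['J','U','L'], ['J','U','L']), (['A','G','U'], ['A','U','G']), (['S','E','P'], ['S','E','P']),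
     (['O','K','T'], ['O','C','T']), (['N','O','V'], ['N','O','V']), (['D','E','S'], ['D','E','C'])]


-- B's while loop: tok = text[i:i+3]; if tok in bulan_map: emit bulan_map[tok], i += 3; else: emit text[i], i += 1
def pvScanGo : List Char → List Char
  | [] => []
  | c :: t =>
    match PySem.Dict.get? pvBulanMapB ((c :: t).take 3) with
    | some v => v ++ pvScanGo ((c :: t).drop 3)
    | none => c :: pvScanGo t
termination_by l => l.length
decreasing_by all_goals simp

-- return "".join(out)
def translate_bulan_alt (text : String) : String := String.ofList (pvScanGo text.toList)

-- ===== PRECONDITION & SPEC =====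
def Spec_translate_bulan (text : String) (out : String) : Prop := out = translate_bulan_alt text
instance (text : String) (out : String) : Decidable (Spec_translate_bulan text out) := by unfold Spec_translate_bulan; infer_instance

-- ===== CLAIM (what is proved, stated in full; the proofs are below) =====
def Claim_equal_translate_bulan : Prop := ∀ (text : String), Dom_translate_bulan text → Spec_translate_bulan text (translate_bulan text)

-- ===== LEMMAS AND PROOFS =====

def pvRep (o r : List Char) : List Char → List Char
  | [] => []
  | c :: t =>
    if o.isPrefixOf (c :: t) then r ++ pvRep o r (t.drop (o.length - 1))
    else c :: pvRep o r t
termination_by l => l.length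
decreasing_by all_goals simp

theorem pvRep_nil (o r : List Char) : pvRep o r [] = [] := by rw [pvRep]

theorem pvRep_cons (o r : List Char) (c : Char) (t : List Char) :
    pvRep o r (c :: t) =
      if o.isPrefixOf (c :: t) then r ++ pvRep o r (t.drop (o.length - 1))
      else c :: pvRep o r t := by
  rw [pvRep]

theorem pvRep_cons_neg (o r : List Char) (c : Char) (t : List Char) (h : ¬ (o <+: c :: t)) :
    pvRep o r (c :: t) = c :: pvRep o r t := by
  rw [pvRep_cons, if_neg]
  simpa [List.isPrefixOf_iff_prefix] using h

theorem pvRep3_pos (a b c : Char) (r u : List Char) :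
    pvRep [a, b, c] r (a :: b :: c :: u) = r ++ pvRep [a, b, c] r u := by
  have hp : List.isPrefixOf [a, b, c] (a :: b :: c :: u) = true := by
    simp [List.isPrefixOf]
  rw [pvRep_cons, if_pos hp]
  rfl

theorem pvScanGo_nil : pvScanGo [] = [] := by rw [pvScanGo]

theorem pvScanGo_cons_none (c : Char) (t : List Char)
    (h : PySem.Dict.get? pvBulanMapB ((c :: t).take 3) = none) :
    pvScanGo (c :: t) = c :: pvScanGo t := by
  rw [pvScanGo, h]

theorem pvScanGo3 (a b c : Char) (u v : List Char)
    (h : PySem.Dict.get? pvBulanMapB [a, b, c] = some v) :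
    pvScanGo (a :: b :: c :: u) = v ++ pvScanGo u := by
  rw [pvScanGo, show (a :: b :: c :: u).take 3 = [a, b, c] from rfl, h]
  rfl

theorem pvReplaceGo_eq (o r : List Char) (ho : o ≠ []) :
    ∀ fuel l acc, l.length ≤ fuel →
      PySem.Chars.replace.go o r fuel l acc = acc.reverse ++ pvRep o r l := by
  intro fuel
  induction fuel with
  | zero =>
    intro l acc h
    have : l = [] := List.eq_nil_of_length_eq_zero (Nat.le_zero.mp h)
    subst this; simp [PySem.Chars.replace.go, pvRep_nil]
  | succ n ih =>
    intro l acc h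
    match l with
    | [] => simp [PySem.Chars.replace.go, pvRep_nil]
    | c :: t =>
      rw [PySem.Chars.replace.go, pvRep_cons]
      by_cases hp : o.isPrefixOf (c :: t)
      · simp only [hp, if_true]
        have hdrop : List.drop o.length (c :: t) = t.drop (o.length - 1) := by
          match o, ho with
          | a :: o', _ => simp
        rw [hdrop, ih _ _ (by simp at h ⊢; omega)]
        simp
      · simp only [hp]
        rw [ih t _ (by simp at h; omega)]
        simp

theorem pvReplace_eq (o r s : List Char) (ho : o ≠ []) :
    PySem.Chars.replace s o r = pvRep o r s := by
  rw [PySem.Chars.replace]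
  simp [List.isEmpty_eq_false_iff.mpr ho, pvReplaceGo_eq o r ho s.length s [] le_rfl]

theorem pvRep_self (o : List Char) (ho : o ≠ []) : ∀ s, pvRep o o s = s := by
  have key : ∀ n (s : List Char), s.length ≤ n → pvRep o o s = s := by
    intro n
    induction n with
    | zero =>
      intro s h
      have : s = [] := List.eq_nil_of_length_eq_zero (Nat.le_zero.mp h)
      subst this; exact pvRep_nil o o
    | succ n ih =>
      intro s h
      match s with
      | [] => exact pvRep_nil o o
      | c :: t =>
        rw [pvRep_cons]
        by_cases hp : o.isPrefixOf (c :: t)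
        · rw [if_pos hp]
          obtain ⟨u, hu⟩ := List.isPrefixOf_iff_prefix.mp hp
          match o, ho with
          | a :: o', _ =>
            rw [List.cons_append] at hu
            injection hu with hc ht
            subst hc
            rw [← ht]
            have hd : (o' ++ u).drop ((a :: o').length - 1) = u := by simp
            rw [hd, ih u (by rw [← ht] at h; simp at h; omega)]
            rfl
        · rw [if_neg hp, ih t (by simp at h; omega)]
    
  intro s; exact key s.length s le_rfl

theorem pvRep_prefix_back (o r q : List Char) (hq : q.length ≤ r.length)
    (hcond : ∀ i, i < q.length → ¬ (q.drop i <+: r)) :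
    ∀ s, q <+: pvRep o r s → q <+: s := by
  have key : ∀ n (q s : List Char), s.length ≤ n → q.length ≤ r.length →
      (∀ i, i < q.length → ¬ (q.drop i <+: r)) → q <+: pvRep o r s → q <+: s := by
    intro n
    induction n with
    | zero =>
      intro q s hs _ _ hpre
      have : s = [] := List.eq_nil_of_length_eq_zero (Nat.le_zero.mp hs)
      subst this
      rwa [pvRep_nil] at hpre
    | succ n ih =>
      intro q s hs hql hqc hpre
      match s with
      | [] => rwa [pvRep_nil] at hpre
      | c :: t =>
        rw [pvRep_cons] at hpre
        match q with
        | [] => exact List.nil_prefix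
        | a :: q' =>
          by_cases hp : o.isPrefixOf (c :: t)
          · rw [if_pos hp] at hpre
            exfalso
            apply hqc 0 (by simp)
            have : (a :: q') = (r ++ pvRep o r (t.drop (o.length - 1))).take (a :: q').length :=
              List.prefix_iff_eq_take.mp hpre
            rw [List.take_append_of_le_length hql] at this
            simpa using List.prefix_iff_eq_take.mpr this
          · rw [if_neg hp] at hpre
            obtain ⟨hac, hq'⟩ := List.cons_prefix_cons.mp hpre
            have : q' <+: t := by
              apply ih q' t (by simp at hs; omega) (by simp at hql; omega) _ hq'
              intro i hi
              have := hqc (i + 1) (by simp at hi ⊢; omega)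
              simpa using this
            exact List.cons_prefix_cons.mpr ⟨hac, this⟩
  intro s
  exact key s.length q s le_rfl hq hcond

def pvChain (l : List Char) : List Char :=
  pvRep ['D','E','S'] ['D','E','C'] (pvRep ['O','K','T'] ['O','C','T']
    (pvRep ['A','G','U'] ['A','U','G'] (pvRep ['M','E','I'] ['M','A','Y'] l)))


theorem pvChain_cons (c : Char) (t : List Char)
    (h1 : ¬ (['M','E','I'] <+: c :: t)) (h2 : ¬ (['A','G','U'] <+: c :: t))
    (h3 : ¬ (['O','K','T'] <+: c :: t)) (h4 : ¬ (['D','E','S'] <+: c :: t)) :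
    pvChain (c :: t) = c :: pvChain t := by
  unfold pvChain
  rw [pvRep_cons_neg _ _ _ _ h1]
  have hA : ¬ (['A','G','U'] <+: c :: pvRep ['M','E','I'] ['M','A','Y'] t) := by
    intro h
    obtain ⟨hc, h'⟩ := List.cons_prefix_cons.mp h
    have := pvRep_prefix_back ['M','E','I'] ['M','A','Y'] ['G','U'] (by simp)
      (by decide) t h'
    exact h2 (List.cons_prefix_cons.mpr ⟨hc, this⟩)
  rw [pvRep_cons_neg _ _ _ _ hA]
  have hO : ¬ (['O','K','T'] <+: c :: pvRep ['A','G','U'] ['A','U','G']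
      (pvRep ['M','E','I'] ['M','A','Y'] t)) := by
    intro h
    obtain ⟨hc, h'⟩ := List.cons_prefix_cons.mp h
    have s1 := pvRep_prefix_back ['A','G','U'] ['A','U','G'] ['K','T'] (by simp)
      (by decide) _ h'
    have s2 := pvRep_prefix_back ['M','E','I'] ['M','A','Y'] ['K','T'] (by simp)
      (by decide) t s1
    exact h3 (List.cons_prefix_cons.mpr ⟨hc, s2⟩)
  rw [pvRep_cons_neg _ _ _ _ hO]
  have hD : ¬ (['D','E','S'] <+: c :: pvRep ['O','K','T'] ['O','C','T']
      (pvRep ['A','G','U'] ['A','U','G'] (pvRep ['M','E','I'] ['M','A','Y'] t))) := by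
    intro h
    obtain ⟨hc, h'⟩ := List.cons_prefix_cons.mp h
    have s1 := pvRep_prefix_back ['O','K','T'] ['O','C','T'] ['E','S'] (by simp)
      (by decide) _ h'
    have s2 := pvRep_prefix_back ['A','G','U'] ['A','U','G'] ['E','S'] (by simp)
      (by decide) _ s1
    have s3 := pvRep_prefix_back ['M','E','I'] ['M','A','Y'] ['E','S'] (by simp)
      (by decide) t s2
    exact h4 (List.cons_prefix_cons.mpr ⟨hc, s3⟩)
  rw [pvRep_cons_neg _ _ _ _ hD]

theorem pvChain_MEI (u : List Char) :
    pvChain ('M'::'E'::'I'::u) = 'M'::'A'::'Y':: pvChain u := by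
  unfold pvChain
  rw [show ('M'::'E'::'I'::u) = ['M','E','I'] ++ u from rfl]
  rw [show (['M','E','I'] ++ u) = 'M'::'E'::'I'::u from rfl, pvRep3_pos]
  generalize pvRep ['M','E','I'] ['M','A','Y'] u = X
  rw [show ['M','A','Y'] ++ X = 'M'::'A'::'Y'::X from rfl]
  rw [pvRep_cons_neg ['A','G','U'] ['A','U','G'] 'M' ('A'::'Y'::X) (by simp [List.cons_prefix_cons]),
      pvRep_cons_neg ['A','G','U'] ['A','U','G'] 'A' ('Y'::X) (by simp [List.cons_prefix_cons]),
      pvRep_cons_neg ['A','G','U'] ['A','U','G'] 'Y' X (by simp [List.cons_prefix_cons])]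
  generalize pvRep ['A','G','U'] ['A','U','G'] X = Y
  rw [pvRep_cons_neg ['O','K','T'] ['O','C','T'] 'M' ('A'::'Y'::Y) (by simp [List.cons_prefix_cons]),
      pvRep_cons_neg ['O','K','T'] ['O','C','T'] 'A' ('Y'::Y) (by simp [List.cons_prefix_cons]),
      pvRep_cons_neg ['O','K','T'] ['O','C','T'] 'Y' Y (by simp [List.cons_prefix_cons])]
  generalize pvRep ['O','K','T'] ['O','C','T'] Y = Z
  rw [pvRep_cons_neg ['D','E','S'] ['D','E','C'] 'M' ('A'::'Y'::Z) (by simp [List.cons_prefix_cons]),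
      pvRep_cons_neg ['D','E','S'] ['D','E','C'] 'A' ('Y'::Z) (by simp [List.cons_prefix_cons]),
      pvRep_cons_neg ['D','E','S'] ['D','E','C'] 'Y' Z (by simp [List.cons_prefix_cons])]

theorem pvChain_AGU (u : List Char) :
    pvChain ('A'::'G'::'U'::u) = 'A'::'U'::'G':: pvChain u := by
  unfold pvChain
  rw [pvRep_cons_neg ['M','E','I'] ['M','A','Y'] 'A' ('G'::'U'::u) (by simp [List.cons_prefix_cons]),
      pvRep_cons_neg ['M','E','I'] ['M','A','Y'] 'G' ('U'::u) (by simp [List.cons_prefix_cons]),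
      pvRep_cons_neg ['M','E','I'] ['M','A','Y'] 'U' u (by simp [List.cons_prefix_cons])]
  generalize pvRep ['M','E','I'] ['M','A','Y'] u = X
  rw [pvRep3_pos]
  generalize pvRep ['A','G','U'] ['A','U','G'] X = Y
  rw [show ['A','U','G'] ++ Y = 'A'::'U'::'G'::Y from rfl]
  rw [pvRep_cons_neg ['O','K','T'] ['O','C','T'] 'A' ('U'::'G'::Y) (by simp [List.cons_prefix_cons]),
      pvRep_cons_neg ['O','K','T'] ['O','C','T'] 'U' ('G'::Y) (by simp [List.cons_prefix_cons]),
      pvRep_cons_neg ['O','K','T'] ['O','C','T'] 'G' Y (by simp [List.cons_prefix_cons])]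
  generalize pvRep ['O','K','T'] ['O','C','T'] Y = Z
  rw [pvRep_cons_neg ['D','E','S'] ['D','E','C'] 'A' ('U'::'G'::Z) (by simp [List.cons_prefix_cons]),
      pvRep_cons_neg ['D','E','S'] ['D','E','C'] 'U' ('G'::Z) (by simp [List.cons_prefix_cons]),
      pvRep_cons_neg ['D','E','S'] ['D','E','C'] 'G' Z (by simp [List.cons_prefix_cons])]

theorem pvChain_OKT (u : List Char) :
    pvChain ('O'::'K'::'T'::u) = 'O'::'C'::'T':: pvChain u := by
  unfold pvChain
  rw [pvRep_cons_neg ['M','E','I'] ['M','A','Y'] 'O' ('K'::'T'::u) (by simp [List.cons_prefix_cons]),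
      pvRep_cons_neg ['M','E','I'] ['M','A','Y'] 'K' ('T'::u) (by simp [List.cons_prefix_cons]),
      pvRep_cons_neg ['M','E','I'] ['M','A','Y'] 'T' u (by simp [List.cons_prefix_cons])]
  generalize pvRep ['M','E','I'] ['M','A','Y'] u = X
  rw [pvRep_cons_neg ['A','G','U'] ['A','U','G'] 'O' ('K'::'T'::X) (by simp [List.cons_prefix_cons]),
      pvRep_cons_neg ['A','G','U'] ['A','U','G'] 'K' ('T'::X) (by simp [List.cons_prefix_cons]),
      pvRep_cons_neg ['A','G','U'] ['A','U','G'] 'T' X (by simp [List.cons_prefix_cons])]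
  generalize pvRep ['A','G','U'] ['A','U','G'] X = Y
  rw [pvRep3_pos]
  generalize pvRep ['O','K','T'] ['O','C','T'] Y = Z
  rw [show ['O','C','T'] ++ Z = 'O'::'C'::'T'::Z from rfl]
  rw [pvRep_cons_neg ['D','E','S'] ['D','E','C'] 'O' ('C'::'T'::Z) (by simp [List.cons_prefix_cons]),
      pvRep_cons_neg ['D','E','S'] ['D','E','C'] 'C' ('T'::Z) (by simp [List.cons_prefix_cons]),
      pvRep_cons_neg ['D','E','S'] ['D','E','C'] 'T' Z (by simp [List.cons_prefix_cons])]

theorem pvChain_DES (u : List Char) :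
    pvChain ('D'::'E'::'S'::u) = 'D'::'E'::'C':: pvChain u := by
  unfold pvChain
  rw [pvRep_cons_neg ['M','E','I'] ['M','A','Y'] 'D' ('E'::'S'::u) (by simp [List.cons_prefix_cons]),
      pvRep_cons_neg ['M','E','I'] ['M','A','Y'] 'E' ('S'::u) (by simp [List.cons_prefix_cons]),
      pvRep_cons_neg ['M','E','I'] ['M','A','Y'] 'S' u (by simp [List.cons_prefix_cons])]
  generalize pvRep ['M','E','I'] ['M','A','Y'] u = X
  rw [pvRep_cons_neg ['A','G','U'] ['A','U','G'] 'D' ('E'::'S'::X) (by simp [List.cons_prefix_cons]),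
      pvRep_cons_neg ['A','G','U'] ['A','U','G'] 'E' ('S'::X) (by simp [List.cons_prefix_cons]),
      pvRep_cons_neg ['A','G','U'] ['A','U','G'] 'S' X (by simp [List.cons_prefix_cons])]
  generalize pvRep ['A','G','U'] ['A','U','G'] X = Y
  rw [pvRep_cons_neg ['O','K','T'] ['O','C','T'] 'D' ('E'::'S'::Y) (by simp [List.cons_prefix_cons]),
      pvRep_cons_neg ['O','K','T'] ['O','C','T'] 'E' ('S'::Y) (by simp [List.cons_prefix_cons]),
      pvRep_cons_neg ['O','K','T'] ['O','C','T'] 'S' Y (by simp [List.cons_prefix_cons])]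
  generalize pvRep ['O','K','T'] ['O','C','T'] Y = Z
  rw [pvRep3_pos]
  rfl

theorem pvLookup_none (c : Char) (t : List Char)
    (h1 : ¬ (['J','A','N'] <+: c :: t)) (h2 : ¬ (['F','E','B'] <+: c :: t))
    (h3 : ¬ (['M','A','R'] <+: c :: t)) (h4 : ¬ (['A','P','R'] <+: c :: t))
    (h5 : ¬ (['M','E','I'] <+: c :: t)) (h6 : ¬ (['J','U','N'] <+: c :: t))
    (h7 : ¬ (['J','U','L'] <+: c :: t)) (h8 : ¬ (['A','G','U'] <+: c :: t))
    (h9 : ¬ (['S','E','P'] <+: c :: t)) (h10 : ¬ (['O','K','T'] <+: c :: t))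
    (h11 : ¬ (['N','O','V'] <+: c :: t)) (h12 : ¬ (['D','E','S'] <+: c :: t)) :
    PySem.Dict.get? pvBulanMapB ((c :: t).take 3) = none := by
  rw [PySem.Dict.get?_eq_none_iff_not_mem_keys]
  intro hmem
  rw [show pvBulanMapB.keys =
      [['J','A','N'], ['F','E','B'], ['M','A','R'], ['A','P','R'], ['M','E','I'], ['J','U','N'],
       ['J','U','L'], ['A','G','U'], ['S','E','P'], ['O','K','T'], ['N','O','V'], ['D','E','S']]
    from by decide] at hmem
  simp only [List.mem_cons, List.not_mem_nil, or_false] at hmem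
  rcases hmem with h|h|h|h|h|h|h|h|h|h|h|h
  · exact h1 (h ▸ List.take_prefix 3 (c :: t))
  · exact h2 (h ▸ List.take_prefix 3 (c :: t))
  · exact h3 (h ▸ List.take_prefix 3 (c :: t))
  · exact h4 (h ▸ List.take_prefix 3 (c :: t))
  · exact h5 (h ▸ List.take_prefix 3 (c :: t))
  · exact h6 (h ▸ List.take_prefix 3 (c :: t))
  · exact h7 (h ▸ List.take_prefix 3 (c :: t))
  · exact h8 (h ▸ List.take_prefix 3 (c :: t))
  · exact h9 (h ▸ List.take_prefix 3 (c :: t))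
  · exact h10 (h ▸ List.take_prefix 3 (c :: t))
  · exact h11 (h ▸ List.take_prefix 3 (c :: t))
  · exact h12 (h ▸ List.take_prefix 3 (c :: t))


theorem pv_main (l : List Char) : pvChain l = pvScanGo l := by
  have key : ∀ n (l : List Char), l.length ≤ n → pvChain l = pvScanGo l := by
    intro n
    induction n with
    | zero =>
      intro l h
      have : l = [] := List.eq_nil_of_length_eq_zero (Nat.le_zero.mp h)
      subst this
      rw [pvScanGo_nil]
      unfold pvChain
      rw [pvRep_nil, pvRep_nil, pvRep_nil, pvRep_nil]
    | succ n ih =>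
      intro l hlen
      match l with
      | [] =>
        rw [pvScanGo_nil]
        unfold pvChain
        rw [pvRep_nil, pvRep_nil, pvRep_nil, pvRep_nil]
      | c :: t =>
        by_cases h1 : (['J','A','N'] <+: c :: t)
        · obtain ⟨u, hu⟩ := h1
          have hul : u.length ≤ n := by
            have hL := congrArg List.length hu
            simp at hL hlen; omega
          rw [← hu]
          show pvChain ('J'::'A'::'N'::u) = pvScanGo ('J'::'A'::'N'::u)
          rw [pvScanGo3 'J' 'A' 'N' u ['J','A','N'] (by decide), ← ih u hul]
          rw [pvChain_cons, pvChain_cons, pvChain_cons]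
          all_goals simp [List.cons_prefix_cons]
        by_cases h2 : (['F','E','B'] <+: c :: t)
        · obtain ⟨u, hu⟩ := h2
          have hul : u.length ≤ n := by
            have hL := congrArg List.length hu
            simp at hL hlen; omega
          rw [← hu]
          show pvChain ('F'::'E'::'B'::u) = pvScanGo ('F'::'E'::'B'::u)
          rw [pvScanGo3 'F' 'E' 'B' u ['F','E','B'] (by decide), ← ih u hul]
          rw [pvChain_cons, pvChain_cons, pvChain_cons]
          all_goals simp [List.cons_prefix_cons]
        by_cases h3 : (['M','A','R'] <+: c :: t)
        · obtain ⟨u, hu⟩ := h3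
          have hul : u.length ≤ n := by
            have hL := congrArg List.length hu
            simp at hL hlen; omega
          rw [← hu]
          show pvChain ('M'::'A'::'R'::u) = pvScanGo ('M'::'A'::'R'::u)
          rw [pvScanGo3 'M' 'A' 'R' u ['M','A','R'] (by decide), ← ih u hul]
          rw [pvChain_cons, pvChain_cons, pvChain_cons]
          all_goals simp [List.cons_prefix_cons]
        by_cases h4 : (['A','P','R'] <+: c :: t)
        · obtain ⟨u, hu⟩ := h4
          have hul : u.length ≤ n := by
            have hL := congrArg List.length hu
            simp at hL hlen; omega
          rw [← hu]
          show pvChain ('A'::'P'::'R'::u) = pvScanGo ('A'::'P'::'R'::u)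
          rw [pvScanGo3 'A' 'P' 'R' u ['A','P','R'] (by decide), ← ih u hul]
          rw [pvChain_cons, pvChain_cons, pvChain_cons]
          all_goals simp [List.cons_prefix_cons]
        by_cases h5 : (['M','E','I'] <+: c :: t)
        · obtain ⟨u, hu⟩ := h5
          have hul : u.length ≤ n := by
            have hL := congrArg List.length hu
            simp at hL hlen; omega
          rw [← hu]
          show pvChain ('M'::'E'::'I'::u) = pvScanGo ('M'::'E'::'I'::u)
          rw [pvChain_MEI, pvScanGo3 'M' 'E' 'I' u ['M','A','Y'] (by decide), ih u hul]
          rfl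
        by_cases h6 : (['J','U','N'] <+: c :: t)
        · obtain ⟨u, hu⟩ := h6
          have hul : u.length ≤ n := by
            have hL := congrArg List.length hu
            simp at hL hlen; omega
          rw [← hu]
          show pvChain ('J'::'U'::'N'::u) = pvScanGo ('J'::'U'::'N'::u)
          rw [pvScanGo3 'J' 'U' 'N' u ['J','U','N'] (by decide), ← ih u hul]
          rw [pvChain_cons, pvChain_cons, pvChain_cons]
          all_goals simp [List.cons_prefix_cons]
        by_cases h7 : (['J','U','L'] <+: c :: t)
        · obtain ⟨u, hu⟩ := h7
          have hul : u.length ≤ n := by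
            have hL := congrArg List.length hu
            simp at hL hlen; omega
          rw [← hu]
          show pvChain ('J'::'U'::'L'::u) = pvScanGo ('J'::'U'::'L'::u)
          rw [pvScanGo3 'J' 'U' 'L' u ['J','U','L'] (by decide), ← ih u hul]
          rw [pvChain_cons, pvChain_cons, pvChain_cons]
          all_goals simp [List.cons_prefix_cons]
        by_cases h8 : (['A','G','U'] <+: c :: t)
        · obtain ⟨u, hu⟩ := h8
          have hul : u.length ≤ n := by
            have hL := congrArg List.length hu
            simp at hL hlen; omega
          rw [← hu]
          show pvChain ('A'::'G'::'U'::u) = pvScanGo ('A'::'G'::'U'::u)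
          rw [pvChain_AGU, pvScanGo3 'A' 'G' 'U' u ['A','U','G'] (by decide), ih u hul]
          rfl
        by_cases h9 : (['S','E','P'] <+: c :: t)
        · obtain ⟨u, hu⟩ := h9
          have hul : u.length ≤ n := by
            have hL := congrArg List.length hu
            simp at hL hlen; omega
          rw [← hu]
          show pvChain ('S'::'E'::'P'::u) = pvScanGo ('S'::'E'::'P'::u)
          rw [pvScanGo3 'S' 'E' 'P' u ['S','E','P'] (by decide), ← ih u hul]
          rw [pvChain_cons, pvChain_cons, pvChain_cons]
          all_goals simp [List.cons_prefix_cons]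
        by_cases h10 : (['O','K','T'] <+: c :: t)
        · obtain ⟨u, hu⟩ := h10
          have hul : u.length ≤ n := by
            have hL := congrArg List.length hu
            simp at hL hlen; omega
          rw [← hu]
          show pvChain ('O'::'K'::'T'::u) = pvScanGo ('O'::'K'::'T'::u)
          rw [pvChain_OKT, pvScanGo3 'O' 'K' 'T' u ['O','C','T'] (by decide), ih u hul]
          rfl
        by_cases h11 : (['N','O','V'] <+: c :: t)
        · obtain ⟨u, hu⟩ := h11
          have hul : u.length ≤ n := by
            have hL := congrArg List.length hu
            simp at hL hlen; omega
          rw [← hu]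
          show pvChain ('N'::'O'::'V'::u) = pvScanGo ('N'::'O'::'V'::u)
          rw [pvScanGo3 'N' 'O' 'V' u ['N','O','V'] (by decide), ← ih u hul]
          rw [pvChain_cons, pvChain_cons, pvChain_cons]
          all_goals simp [List.cons_prefix_cons]
        by_cases h12 : (['D','E','S'] <+: c :: t)
        · obtain ⟨u, hu⟩ := h12
          have hul : u.length ≤ n := by
            have hL := congrArg List.length hu
            simp at hL hlen; omega
          rw [← hu]
          show pvChain ('D'::'E'::'S'::u) = pvScanGo ('D'::'E'::'S'::u)
          rw [pvChain_DES, pvScanGo3 'D' 'E' 'S' u ['D','E','C'] (by decide), ih u hul]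
          rfl
        have hlt : t.length ≤ n := by simp at hlen; omega
        rw [pvChain_cons c t h5 h8 h10 h12,
            pvScanGo_cons_none c t (pvLookup_none c t h1 h2 h3 h4 h5 h6 h7 h8 h9 h10 h11 h12),
            ih t hlt]
  exact key l.length l le_rfl

-- ===== VERDICT (by name: the statement is the Claim_ definition above) =====
theorem translate_bulan_spec : Claim_equal_translate_bulan := by
  intro text _
  unfold Spec_translate_bulan
  unfold translate_bulan translate_bulan_alt
  rw [show pvBulanMapA.items =
      [("JAN", "JAN"), ("FEB", "FEB"), ("MAR", "MAR"), ("APR", "APR"), ("MEI", "MAY"),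
       ("JUN", "JUN"), ("JUL", "JUL"), ("AGU", "AUG"), ("SEP", "SEP"), ("OKT", "OCT"),
       ("NOV", "NOV"), ("DES", "DEC")] from by decide]
  simp only [List.foldl_cons, List.foldl_nil]
  simp only [PySem.Str.replace, String.toList_ofList]
  simp only [show ("JAN" : String).toList = ['J','A','N'] from rfl,
    show ("FEB" : String).toList = ['F','E','B'] from rfl,
    show ("MAR" : String).toList = ['M','A','R'] from rfl,
    show ("APR" : String).toList = ['A','P','R'] from rfl,
    show ("MEI" : String).toList = ['M','E','I'] from rfl,
    show ("MAY" : String).toList = ['M','A','Y'] from rfl,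
    show ("JUN" : String).toList = ['J','U','N'] from rfl,
    show ("JUL" : String).toList = ['J','U','L'] from rfl,
    show ("AGU" : String).toList = ['A','G','U'] from rfl,
    show ("AUG" : String).toList = ['A','U','G'] from rfl,
    show ("SEP" : String).toList = ['S','E','P'] from rfl,
    show ("OKT" : String).toList = ['O','K','T'] from rfl,
    show ("OCT" : String).toList = ['O','C','T'] from rfl,
    show ("NOV" : String).toList = ['N','O','V'] from rfl,
    show ("DES" : String).toList = ['D','E','S'] from rfl,
    show ("DEC" : String).toList = ['D','E','C'] from rfl]
  simp only [pvReplace_eq _ _ _ (by simp : (['J','A','N'] : List Char) ≠ []),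
    pvReplace_eq _ _ _ (by simp : (['F','E','B'] : List Char) ≠ []),
    pvReplace_eq _ _ _ (by simp : (['M','A','R'] : List Char) ≠ []),
    pvReplace_eq _ _ _ (by simp : (['A','P','R'] : List Char) ≠ []),
    pvReplace_eq _ _ _ (by simp : (['M','E','I'] : List Char) ≠ []),
    pvReplace_eq _ _ _ (by simp : (['J','U','N'] : List Char) ≠ []),
    pvReplace_eq _ _ _ (by simp : (['J','U','L'] : List Char) ≠ []),
    pvReplace_eq _ _ _ (by simp : (['A','G','U'] : List Char) ≠ []),
    pvReplace_eq _ _ _ (by simp : (['S','E','P'] : List Char) ≠ []),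
    pvReplace_eq _ _ _ (by simp : (['O','K','T'] : List Char) ≠ []),
    pvReplace_eq _ _ _ (by simp : (['N','O','V'] : List Char) ≠ []),
    pvReplace_eq _ _ _ (by simp : (['D','E','S'] : List Char) ≠ [])]
  rw [pvRep_self ['J','A','N'] (by simp), pvRep_self ['F','E','B'] (by simp),
      pvRep_self ['M','A','R'] (by simp), pvRep_self ['A','P','R'] (by simp),
      pvRep_self ['J','U','N'] (by simp), pvRep_self ['J','U','L'] (by simp),
      pvRep_self ['S','E','P'] (by simp), pvRep_self ['N','O','V'] (by simp)]
  exact congrArg String.ofList (pv_main text.toList)
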